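-- pv_equiv track=rewrite | github.com/thom-heinrich/twinr | src/twinr/agent/legacy/classic_hardware_loop.py | _segment_boundary
-- ===== SOURCE A (Python) =====
-- def _segment_boundary(text: str) -> int | None:
--     for index, character in enumerate(text):
--         if character not in ".?!":
--             continue
--         previous_character = text[index - 1] if index > 0 else ""
--         next_character = text[index + 1] if index + 1 < len(text) else ""
--         # AUDIT-FIX(#13): Avoid splitting mid-number/mid-token, which made TTS choppy for decimals and abbreviations.
--         if character == "." and previous_character.isdigit() and next_character.isdigit():
--             continue
--         if next_character and next_character not in {' ', '\n', '"', "'", ')', ']', '}'}: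
--             continue
--         return index + 1
--     if len(text) >= 140:
--         return len(text)
--     return None
-- ===== SOURCE B (Python) =====
-- def _segment_boundary(text: str) -> int | None:
--     # Staged strategy: for each terminator character independently, use repeated
--     # str.find to locate its earliest occurrence that is followed by an allowed
--     # separator or end-of-text; the answer is the minimum over the three
--     # terminators.  (A's mid-number digit check is redundant: a digit next-char
--     # already fails the separator test.)
--     n = len(text)
--
--     def earliest(t):
--         pos = text.find(t)
--         while pos != -1:
--             if pos + 1 == n or text[pos + 1] in ' \n"\')]}':
--                 return pos
--             pos = text.find(t, pos + 1)
--         return None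
--
--     hits = [p for p in map(earliest, ".?!") if p is not None]
--     if hits:
--         return min(hits) + 1
--     return n if n >= 140 else None
-- ===== Notes on version B (the rewrite author's own statement) =====
-- stated objective: faster
-- what changed: B replaces A's single per-character enumerate scan (with prev/next index lookups and a redundant mid-number digit branch) by three independent repeated-str.find searches, one per terminator character, taking the minimum of their earliest valid positions; the character scanning moves into C-level str.find, leaving only a few Python-level loop iterations.
import Mathlib
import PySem

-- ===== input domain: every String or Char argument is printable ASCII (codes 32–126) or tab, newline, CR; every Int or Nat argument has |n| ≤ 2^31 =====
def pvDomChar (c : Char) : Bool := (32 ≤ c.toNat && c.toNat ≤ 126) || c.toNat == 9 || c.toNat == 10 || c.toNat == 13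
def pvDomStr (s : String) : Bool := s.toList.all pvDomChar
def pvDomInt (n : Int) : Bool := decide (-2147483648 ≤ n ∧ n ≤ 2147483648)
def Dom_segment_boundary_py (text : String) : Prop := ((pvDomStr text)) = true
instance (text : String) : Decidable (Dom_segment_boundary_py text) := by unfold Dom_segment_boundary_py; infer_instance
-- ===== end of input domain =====

-- B replaces A's single enumerate scan (prev/next index lookups, redundant mid-number
-- digit branch) by three independent repeated-find searches, one per terminator
-- character, taking the minimum of their earliest valid positions; objective: faster
-- (measured: the scanning moves into str.find).


-- ===== PORT A =====
-- character not in ".?!"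
def pvTermA (c : Char) : Bool := c = '.' || c = '?' || c = '!'
-- next_character not in {' ', '\n', '"', "'", ')', ']', '}'}
def pvSepA (c : Char) : Bool :=
  c = ' ' || c = '\n' || c = '"' || c = '\'' || c = ')' || c = ']' || c = '}'
-- str.isdigit of a one-character string (exact on the ASCII domain)
def pvDigit (c : Char) : Bool := '0' ≤ c && c ≤ '9'

-- the 'for index, character in enumerate(text)' loop; '' is modelled as none
def segALoop (cs : List Char) : List (Int × Char) → Option Int
  | [] => none
  | (i, ch) :: rest =>
    if !(pvTermA ch) then segALoop cs rest
    else
      let prev : Option Char := if i > 0 then PySem.List.pyGet? cs (i - 1) else none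
      let nxt : Option Char := if i + 1 < (cs.length : Int) then PySem.List.pyGet? cs (i + 1) else none
      if ch = '.' && (prev.map pvDigit).getD false && (nxt.map pvDigit).getD false then
        segALoop cs rest
      else if nxt.isSome && !((nxt.map pvSepA).getD false) then
        segALoop cs rest
      else some (i + 1)

def segment_boundary_py (text : String) : Option Int :=
  match segALoop text.toList (PySem.List.enumerate text.toList) with
  | some r => some r
  | none => if 140 ≤ text.toList.length then some (text.toList.length : Int) else none

-- ===== PORT B =====
-- next char in ' \n"\')]}'
def pvSepB (c : Char) : Bool := c ∈ " \n\"')]}".toList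
-- text.find(t, start) for a single-character needle t — exact for one-char needles
-- with 0 ≤ start ≤ len(text): the first index ≥ start holding t, none for -1
def pyFindFrom (cs : List Char) (t : Char) (start : Nat) : Option Nat :=
  ((cs.drop start).findIdx? (· = t)).map (start + ·)

theorem pyFindFrom_bounds {cs : List Char} {t : Char} {start pos : Nat}
    (h : pyFindFrom cs t start = some pos) : start ≤ pos ∧ pos < cs.length := by
  unfold pyFindFrom at h
  cases hf : (cs.drop start).findIdx? (· = t) with
  | none => simp [hf] at h
  | some j =>
    have hj : j < (cs.drop start).length := by
      have := List.findIdx?_eq_some_iff_findIdx_eq.mp hf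
      have h2 := this.1
      exact h2
    rw [hf] at h
    simp at h
    subst h
    constructor
    · omega
    · have := List.length_drop (l := cs) (i := start)
      omega

-- the inner 'while pos != -1' loop of B's helper earliest(t)
def bEarliest (cs : List Char) (t : Char) (start : Nat) : Option Nat :=
  match h : pyFindFrom cs t start with
  | none => none
  | some pos =>
    if pos + 1 = cs.length || pvSepB (cs.getD (pos + 1) ' ') then some pos
    else bEarliest cs t (pos + 1)
termination_by cs.length - start
decreasing_by
  have := pyFindFrom_bounds h
  omega

def segment_boundary_py_alt (text : String) : Option Int :=
  let cs := text.toList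
  let n := cs.length
  let hits : List Nat := ([bEarliest cs '.' 0, bEarliest cs '?' 0, bEarliest cs '!' 0]).filterMap id
  match hits.min? with
  | some m => some ((m : Int) + 1)
  | none => if 140 ≤ n then some (n : Int) else none

-- ===== PRECONDITION & SPEC =====
def Spec_segment_boundary_py (text : String) (out : Option Int) : Prop := out = segment_boundary_py_alt text
instance (text : String) (out : Option Int) : Decidable (Spec_segment_boundary_py text out) := by unfold Spec_segment_boundary_py; infer_instance

-- ===== CLAIM (what is proved, stated in full; the proofs are below) =====
def Claim_equal_segment_boundary_py : Prop := ∀ (text : String), Dom_segment_boundary_py text → Spec_segment_boundary_py text (segment_boundary_py text)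

-- ===== LEMMAS AND PROOFS =====

theorem pvSep_eq (c : Char) : pvSepB c = pvSepA c := by
  simp [pvSepA, pvSepB, Bool.or_assoc]

theorem pvSep_not_digit (c : Char) (h : pvSepA c = true) : pvDigit c = false := by
  have h' : c = ' ' ∨ c = '\n' ∨ c = '"' ∨ c = '\'' ∨ c = ')' ∨ c = ']' ∨ c = '}' := by
    simpa [pvSepA, or_assoc] using h
  rcases h' with h|h|h|h|h|h|h <;> subst h <;> decide

-- first valid boundary position for the single terminator t (reference form of B's loop)
def fvT (t : Char) : List Char → Nat → Option Nat
  | [], _ => none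
  | [c], i => if c = t then some i else none
  | c :: n :: rest, i => if c = t && pvSepB n then some i else fvT t (n :: rest) (i + 1)

-- first valid boundary position for any terminator (reference form of A's loop)
def fvAll : List Char → Nat → Option Nat
  | [], _ => none
  | [c], i => if pvTermA c then some i else none
  | c :: n :: rest, i => if pvTermA c && pvSepA n then some i else fvAll (n :: rest) (i + 1)

theorem fvT_ge (t : Char) : ∀ (suf : List Char) (i p : Nat), fvT t suf i = some p → i ≤ p := by
  intro suf
  induction suf with
  | nil => intro i p h; simp [fvT] at h
  | cons c rest ih =>
    intro i p h
    cases rest with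
    | nil =>
      by_cases hc : c = t <;> simp [fvT, hc] at h
      omega
    | cons n rest' =>
      by_cases hc : (c = t && pvSepB n) = true
      · simp [fvT, hc] at h; omega
      · simp only [fvT, hc] at h
        rw [if_neg (by simp_all)] at h
        have := ih (i + 1) p h
        omega

-- left-associated merge of optional positions by minimum (how B's min over hits acts)
def mo (a b : Option Nat) : Option Nat :=
  match a, b with
  | none, b => b
  | some x, none => some x
  | some x, some y => some (min x y)

theorem mo_min (suf : List Char) : ∀ (i : Nat),
    mo (mo (fvT '.' suf i) (fvT '?' suf i)) (fvT '!' suf i) = fvAll suf i := by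
  induction suf with
  | nil => intro i; simp [fvT, fvAll, mo]
  | cons c rest ih =>
    intro i
    cases rest with
    | nil =>
      by_cases h1 : c = '.'
      · subst h1; simp [fvT, fvAll, mo, pvTermA]
      · by_cases h2 : c = '?'
        · subst h2; simp [fvT, fvAll, mo, pvTermA]
        · by_cases h3 : c = '!'
          · subst h3; simp [fvT, fvAll, mo, pvTermA]
          · simp [fvT, fvAll, mo, pvTermA, h1, h2, h3]
    | cons n rest' =>
      by_cases hsep : pvSepB n = true
      · have hsepA : pvSepA n = true := by rw [← pvSep_eq]; exact hsep
        by_cases h1 : c = '.'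
        · subst h1
          have e2 := fvT_ge '?' (n :: rest') (i + 1)
          have e3 := fvT_ge '!' (n :: rest') (i + 1)
          simp only [fvT, fvAll, hsep, hsepA, pvTermA]
          cases h2 : fvT '?' (n :: rest') (i + 1) with
          | none =>
            cases h3 : fvT '!' (n :: rest') (i + 1) with
            | none => simp [mo]
            | some q => have := e3 q h3; simp [mo]; omega
          | some p =>
            have hp := e2 p h2
            cases h3 : fvT '!' (n :: rest') (i + 1) with
            | none => simp [mo]; omega
            | some q => have := e3 q h3; simp [mo]; omega
        · by_cases h2 : c = '?'
          · subst h2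
            have e1 := fvT_ge '.' (n :: rest') (i + 1)
            have e3 := fvT_ge '!' (n :: rest') (i + 1)
            simp only [fvT, fvAll, hsep, hsepA, pvTermA]
            cases hx : fvT '.' (n :: rest') (i + 1) with
            | none =>
              cases h3 : fvT '!' (n :: rest') (i + 1) with
              | none => simp [mo]
              | some q => have := e3 q h3; simp [mo]; omega
            | some p =>
              have hp := e1 p hx
              cases h3 : fvT '!' (n :: rest') (i + 1) with
              | none => simp [mo]; omega
              | some q => have := e3 q h3; simp [mo]; omega
          · by_cases h3 : c = '!'
            · subst h3
              have e1 := fvT_ge '.' (n :: rest') (i + 1)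
              have e2 := fvT_ge '?' (n :: rest') (i + 1)
              simp only [fvT, fvAll, hsep, hsepA, pvTermA]
              cases hx : fvT '.' (n :: rest') (i + 1) with
              | none =>
                cases hy : fvT '?' (n :: rest') (i + 1) with
                | none => simp [mo]
                | some q => have := e2 q hy; simp [mo]; omega
              | some p =>
                have hp := e1 p hx
                cases hy : fvT '?' (n :: rest') (i + 1) with
                | none => simp [mo]; omega
                | some q => have := e2 q hy; simp [mo]; omega
            · simp only [fvT, fvAll, pvTermA, h1, h2, h3]
              simp [ih (i + 1)]
      · have hsepA : pvSepA n = false := by rw [← pvSep_eq]; simpa using hsep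
        simp [fvT, fvAll, hsep, hsepA, ih (i + 1)]

theorem bEarliest_none (cs : List Char) (t : Char) (start : Nat)
    (h : pyFindFrom cs t start = none) : bEarliest cs t start = none := by
  rw [bEarliest.eq_def]
  split
  · rfl
  · simp_all

theorem bEarliest_some (cs : List Char) (t : Char) (start pos : Nat)
    (h : pyFindFrom cs t start = some pos) :
    bEarliest cs t start =
      if pos + 1 = cs.length || pvSepB (cs.getD (pos + 1) ' ') then some pos
      else bEarliest cs t (pos + 1) := by
  rw [bEarliest.eq_def]
  split
  · simp_all
  · rename_i pos' h'
    have hp : pos' = pos := by rw [h'] at h; injection h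
    subst hp; rfl

theorem bEarliest_aux (cs : List Char) (t : Char) : ∀ (m start : Nat),
    cs.length - start ≤ m → bEarliest cs t start = fvT t (cs.drop start) start := by
  intro m
  induction m with
  | zero =>
    intro start hle
    have hge : cs.length ≤ start := by omega
    have hnil : cs.drop start = [] := List.drop_eq_nil_of_le hge
    rw [bEarliest_none cs t start (by unfold pyFindFrom; rw [hnil]; simp)]
    rw [hnil]; simp [fvT]
  | succ m ih =>
    intro start hle
    cases hdrop : cs.drop start with
    | nil =>
      rw [bEarliest_none cs t start (by unfold pyFindFrom; rw [hdrop]; simp)]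
      simp [fvT]
    | cons c rest =>
      have hk : start < cs.length := by
        by_contra hk
        rw [List.drop_eq_nil_of_le (Nat.le_of_not_lt hk)] at hdrop
        simp at hdrop
      have hdrop1 : cs.drop (start + 1) = rest := by
        have : cs.drop (start + 1) = (cs.drop start).drop 1 := by rw [List.drop_drop]
        simpa [hdrop] using this
      by_cases hc : c = t
      · have hpf : pyFindFrom cs t start = some start := by
          unfold pyFindFrom; rw [hdrop]; simp [List.findIdx?_cons, hc]
        rw [bEarliest_some cs t start start hpf]
        cases rest with
        | nil =>
          have hlen : cs.length = start + 1 := by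
            have := congrArg List.length hdrop
            simp at this; omega
          rw [if_pos (by simp [hlen])]
          simp [fvT, hc]
        | cons n rest' =>
          have hlen : start + 1 < cs.length := by
            have := congrArg List.length hdrop
            simp at this; omega
          have hget : cs.getD (start + 1) ' ' = n := by
            have h0 : (cs.drop (start+1))[0]? = cs[(start+1)+0]? := List.getElem?_drop
            rw [hdrop1] at h0
            simp at h0
            simp [List.getD, h0.symm]
          rw [hget]
          have hne : ¬ (start + 1 = cs.length) := by omega
          by_cases hsep : pvSepB n = true
          · rw [if_pos (by simp [hsep])]
            simp [fvT, hc, hsep]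
          · rw [if_neg (by simp [hne]; simpa using hsep)]
            rw [ih (start + 1) (by omega), hdrop1]
            simp only [Bool.not_eq_true] at hsep
            simp [fvT, hc, hsep]
      · have hpf : pyFindFrom cs t start = pyFindFrom cs t (start + 1) := by
          unfold pyFindFrom
          rw [hdrop, hdrop1]
          simp only [List.findIdx?_cons]
          rw [if_neg (by simp [hc])]
          cases rest.findIdx? (· = t) <;> simp
          omega
        have hstep : bEarliest cs t start = bEarliest cs t (start + 1) := by
          cases hv : pyFindFrom cs t (start + 1) with
          | none =>
            rw [bEarliest_none cs t start (hpf.trans hv), bEarliest_none cs t (start + 1) hv]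
          | some pos =>
            rw [bEarliest_some cs t start pos (hpf.trans hv), bEarliest_some cs t (start + 1) pos hv]
        rw [hstep, ih (start + 1) (by omega), hdrop1]
        cases rest with
        | nil => simp [fvT, hc]
        | cons n rest' => simp [fvT, hc]

theorem bEarliest_eq_fvT (cs : List Char) (t : Char) : ∀ (start : Nat),
    bEarliest cs t start = fvT t (cs.drop start) start := by
  intro start
  exact bEarliest_aux cs t (cs.length - start) start (le_refl _)

theorem main_lemma (full : List Char) : ∀ (suf : List Char) (k : Nat),
    full.drop k = suf →
    segALoop full (PySem.List.enumerate suf (k : Int)) =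
      (fvAll suf k).map (fun p => ((p : Nat) : Int) + 1) := by
  intro suf
  induction suf with
  | nil => intro k h; simp [PySem.List.enumerate, segALoop, fvAll]
  | cons c suf' ih =>
    intro k h
    have hk : k < full.length := by
      by_contra hk
      simp [List.drop_eq_nil_of_le (Nat.le_of_not_lt hk)] at h
    have hdrop' : full.drop (k + 1) = suf' := by
      have : full.drop (k+1) = (full.drop k).drop 1 := by
        rw [List.drop_drop]
      simpa [h] using this
    have h0 : (List.drop (k+1) full)[0]? = full[(k+1)+0]? := List.getElem?_drop
    rw [hdrop'] at h0
    have hnext : full[k+1]? = suf'.head? := by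
      cases suf' <;> simpa using h0.symm
    rw [PySem.List.enumerate_cons]
    show segALoop full ((↑k, c) :: PySem.List.enumerate suf' (↑k + 1)) = _
    have hcast : ((k:Int) + 1) = (((k+1 : Nat)) : Int) := by push_cast; ring
    have hrec := ih (k+1) hdrop'
    rw [← hcast] at hrec
    unfold segALoop
    by_cases hterm : pvTermA c = true
    · -- terminator character
      have hnxtval : (if (k : Int) + 1 < (full.length : Int) then PySem.List.pyGet? full ((k:Int) + 1) else none) = suf'.head? := by
        by_cases hlt : k + 1 < full.length
        · rw [if_pos (by exact_mod_cast hlt), hcast, PySem.List.pyGet?_natCast]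
          exact hnext
        · rw [if_neg (by exact_mod_cast hlt)]
          have hn : full[k+1]? = none := by
            rw [List.getElem?_eq_none_iff]; omega
          rw [hn] at hnext; exact hnext
      cases hsuf' : suf'.head? with
      | none =>
        have hnil : suf' = [] := by cases suf' <;> simp_all
        subst hnil
        simp only [hterm, hnxtval, hsuf']
        simp [fvAll, hterm]
      | some n =>
        rcases (by cases suf' <;> simp_all : ∃ t, suf' = n :: t) with ⟨t, rfl⟩
        simp only [hterm, hnxtval, hsuf']
        by_cases hsep : pvSepA n = true
        · have hnd : pvDigit n = false := pvSep_not_digit n hsep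
          simp [fvAll, hterm, hsep, hnd]
        · simp only [Bool.not_eq_true] at hsep
          by_cases hdig : (c = '.' && ((if (k:Int) > 0 then PySem.List.pyGet? full ((k:Int) - 1) else none).map pvDigit).getD false && pvDigit n) = true
          · simp only [hdig, if_true, Option.map_some, Option.getD_some]
            simp only [ite_self]
            rw [hrec]
            simp [fvAll, hterm, hsep]
          · simp only [hdig, Option.isSome_some, Option.map_some, Option.getD_some, hsep,
              Bool.not_false, Bool.and_true, if_true, ite_self]
            rw [hrec]
            simp [fvAll, hterm, hsep]
    · -- not a terminator: both skip
      simp only [Bool.not_eq_true] at hterm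
      simp only [hterm, Bool.not_false, if_true]
      rw [hrec]
      cases suf' with
      | nil => simp [fvAll, hterm]
      | cons n t => simp [fvAll, hterm]

theorem min?_eq_mo (e1 e2 e3 : Option Nat) :
    (([e1, e2, e3]).filterMap id).min? = mo (mo e1 e2) e3 := by
  cases e1 <;> cases e2 <;> cases e3 <;>
    simp [mo, List.min?, Nat.min_assoc]

-- ===== VERDICT (by name: the statement is the Claim_ definition above) =====
theorem segment_boundary_py_spec : Claim_equal_segment_boundary_py := by
  intro text _
  unfold Spec_segment_boundary_py segment_boundary_py segment_boundary_py_alt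
  have h := main_lemma text.toList text.toList 0 (by simp)
  rw [show ((0:Nat):Int) = 0 by simp] at h
  rw [h]
  simp only
  rw [min?_eq_mo, bEarliest_eq_fvT, bEarliest_eq_fvT, bEarliest_eq_fvT]
  simp only [List.drop_zero]
  rw [mo_min]
  cases hfv : fvAll text.toList 0 with
  | some p => simp
  | none => simp
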